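-- pv_equiv track=rewrite | github.com/dyens/kissues | kissues/distinct_letters_count.py | count_letters_to_delete
-- ===== SOURCE A (Python) =====
-- from collections import Counter
--
-- MAX_N = 300_000
--
-- def count_letters_to_delete(s: str) -> int:
--     """Count letters to delete.
--
--     Count the minimum number of letters that must be
--     deleted from a word to create a word in which no
--     two letters occur the same number of times.
--
--     :param s: input string
--     :return: number letters to remove
--     """
--     if len(s) > MAX_N:
--         raise ValueError("So long string")
--
--     letters = Counter(s)
--     freqs = sorted(letters.values())
--
--     to_delete = 0
--
--     # we need remove letters only if we have > 2 freq in freqs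
--     while len(freqs) > 1:
--         max_freq = freqs.pop()
--         prev_freq = freqs[-1]
--         if max_freq == prev_freq:
--             if max_freq > 1:
--                 freqs.append(max_freq - 1)
--                 freqs.sort()
--             to_delete += 1
--     return to_delete
-- ===== SOURCE B (Python) =====
-- from collections import Counter
--
-- MAX_N = 300_000
--
-- def count_letters_to_delete(s: str) -> int:
--     """Minimum deletions so that no two letters share a frequency.
--
--     Single descending sweep: each frequency is capped one below the
--     previous kept value (never below zero); the deletions are the sum
--     of the caps applied.
--     """
--     if len(s) > MAX_N:
--         raise ValueError("So long string")
--
--     deletions = 0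
--     prev = len(s) + 1
--     for f in sorted(Counter(s).values(), reverse=True):
--         a = min(f, max(prev - 1, 0))
--         deletions += f - a
--         prev = a
--     return deletions
-- ===== Notes on version B (the rewrite author's own statement) =====
-- stated objective: simpler
-- what changed: Replaces A's destructive pop/compare/re-sort loop over the ascending frequency list by a single descending sweep that caps each frequency at one below the previously kept value (never below zero) and sums the caps.
import Mathlib
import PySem

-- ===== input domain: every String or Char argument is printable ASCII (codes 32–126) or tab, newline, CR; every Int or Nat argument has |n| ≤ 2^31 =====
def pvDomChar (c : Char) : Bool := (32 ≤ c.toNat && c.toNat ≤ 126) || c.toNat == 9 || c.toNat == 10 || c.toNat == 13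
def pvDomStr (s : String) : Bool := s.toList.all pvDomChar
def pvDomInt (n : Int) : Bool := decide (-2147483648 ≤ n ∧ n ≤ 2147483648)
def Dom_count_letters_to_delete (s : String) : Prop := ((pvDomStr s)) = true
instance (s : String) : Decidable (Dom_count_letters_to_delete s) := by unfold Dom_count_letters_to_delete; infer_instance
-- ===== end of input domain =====

-- B replaces A's destructive pop/compare/re-sort loop by a single descending sweep
-- capping each frequency one below the previous kept value (objective: simpler).

-- ===== PORT A =====

-- termination measure for A's while loop (sum of nonnegative parts + length)
def pvMu (l : List Int) : Nat := (l.map Int.toNat).sum + l.length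

theorem pvMu_append_singleton (xs : List Int) (y : Int) :
    pvMu (xs ++ [y]) = pvMu xs + y.toNat + 1 := by
  simp [pvMu]; omega

theorem pvMu_sorted (xs : List Int) :
    pvMu (PySem.List.sorted xs (fun x => x) false) = pvMu xs := by
  have h := PySem.List.sorted_perm (xs := xs) (key := fun x => x) (rev := false)
  unfold pvMu
  rw [(h.map Int.toNat).sum_eq, h.length_eq]

-- A's while loop: freqs is the (mutable, sorted) list, to_delete the accumulator.
-- Python's freqs.pop() is read as "last element" + dropLast; freqs[-1] is pyGetD.
def pvAloop (freqs : List Int) (to_delete : Int) : Int :=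
  if h : 1 < freqs.length then
    let max_freq := PySem.List.pyGetD freqs (-1) 0
    let rest := freqs.dropLast
    let prev_freq := PySem.List.pyGetD rest (-1) 0
    if max_freq = prev_freq then
      if max_freq > 1 then
        pvAloop (PySem.List.sorted (rest ++ [max_freq - 1]) (fun x => x) false) (to_delete + 1)
      else
        pvAloop rest (to_delete + 1)
    else
      pvAloop rest to_delete
  else to_delete
termination_by pvMu freqs
decreasing_by
  · have hne : freqs ≠ [] := by intro hnil; simp [hnil] at h
    have hsplit : freqs.dropLast ++ [freqs.getLast hne] = freqs := List.dropLast_concat_getLast hne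
    have hget : PySem.List.pyGetD freqs (-1) 0 = freqs.getLast hne := PySem.List.pyGetD_neg_one freqs 0 hne
    rw [pvMu_sorted, pvMu_append_singleton]
    calc pvMu freqs.dropLast + (PySem.List.pyGetD freqs (-1) 0 - 1).toNat + 1
        < pvMu freqs.dropLast + (PySem.List.pyGetD freqs (-1) 0).toNat + 1 := by omega
      _ = pvMu freqs := by
          rw [hget]
          conv_rhs => rw [← hsplit]
          rw [pvMu_append_singleton]
  · have hne : freqs ≠ [] := by intro hnil; simp [hnil] at h
    have hsplit : freqs.dropLast ++ [freqs.getLast hne] = freqs := List.dropLast_concat_getLast hne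
    have : pvMu freqs = pvMu freqs.dropLast + (freqs.getLast hne).toNat + 1 := by
      conv_lhs => rw [← hsplit]
      rw [pvMu_append_singleton]
    omega
  · have hne : freqs ≠ [] := by intro hnil; simp [hnil] at h
    have hsplit : freqs.dropLast ++ [freqs.getLast hne] = freqs := List.dropLast_concat_getLast hne
    have : pvMu freqs = pvMu freqs.dropLast + (freqs.getLast hne).toNat + 1 := by
      conv_lhs => rw [← hsplit]
      rw [pvMu_append_singleton]
    omega

-- the len(s) > MAX_N guard RAISES in Python; those inputs are excluded by Pre_ below
def count_letters_to_delete (s : String) : Int :=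
  let letters := PySem.Dict.counter s.toList
  let freqs := PySem.List.sorted letters.values (fun x => x) false
  pvAloop freqs 0

-- ===== PORT B =====

def pvBstep (st : Int × Int) (f : Int) : Int × Int :=
  let a := min f (max (st.1 - 1) 0)
  (a, st.2 + (f - a))

-- the len(s) > MAX_N guard RAISES in Python; those inputs are excluded by Pre_ below
def count_letters_to_delete_alt (s : String) : Int :=
  let freqs := PySem.List.sorted (PySem.Dict.counter s.toList).values (fun x => x) true
  (freqs.foldl pvBstep ((s.length : Int) + 1, 0)).2

-- ===== PRECONDITION & SPEC =====
-- Pre_ excludes exactly the strings longer than MAX_N = 300000, on which A raises ValueError.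
def Pre_count_letters_to_delete (s : String) : Prop := s.length ≤ 300000
instance (s : String) : Decidable (Pre_count_letters_to_delete s) := by
  unfold Pre_count_letters_to_delete; infer_instance

def pvWitness_count_letters_to_delete : String := "abbccc"

def Spec_count_letters_to_delete (s : String) (out : Int) : Prop := out = count_letters_to_delete_alt s
instance (s : String) (out : Int) : Decidable (Spec_count_letters_to_delete s out) := by
  unfold Spec_count_letters_to_delete; infer_instance

-- ===== CLAIM (what is proved, stated in full; the proofs are below) =====
def Claim_equal_count_letters_to_delete : Prop := ∀ (s : String), Dom_count_letters_to_delete s → Pre_count_letters_to_delete s → Spec_count_letters_to_delete s (count_letters_to_delete s)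

-- ===== LEMMAS AND PROOFS =====

-- B's sweep as a recursion (prev, then list processed head first, descending)
def pvBscan (p : Int) : List Int → Int
  | [] => 0
  | f :: r => (f - min f (max (p - 1) 0)) + pvBscan (min f (max (p - 1) 0)) r

theorem pvFoldl_eq_bscan (r : List Int) : ∀ (p d : Int),
    (r.foldl pvBstep (p, d)).2 = d + pvBscan p r := by
  induction r with
  | nil => intro p d; simp [pvBscan]
  | cons f r ih => intro p d; simp only [List.foldl_cons, pvBscan, pvBstep, ih]; ring

theorem pvBscan_le_one (r : List Int) : ∀ p : Int, p ≤ 1 → (∀ x ∈ r, 0 ≤ x) →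
    pvBscan p r = r.sum := by
  induction r with
  | nil => intro p _ _; simp [pvBscan]
  | cons f r ih =>
    intro p hp hpos
    have hf : 0 ≤ f := hpos f (by simp)
    have ha : min f (max (p - 1) 0) = 0 := by omega
    simp only [pvBscan, ha, List.sum_cons]
    rw [ih 0 (by omega) (fun x hx => hpos x (by simp [hx]))]
    ring

-- descending insertion (mirror of ascending insertion below)
def pvInsDesc (v : Int) : List Int → List Int
  | [] => [v]
  | f :: r => if v ≤ f then f :: pvInsDesc v r else v :: f :: r

def pvInsAsc (v : Int) : List Int → List Int
  | [] => [v]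
  | x :: xs => if v ≤ x then v :: x :: xs else x :: pvInsAsc v xs

theorem pvInsDesc_sum (v : Int) (r : List Int) : (pvInsDesc v r).sum = v + r.sum := by
  induction r with
  | nil => simp [pvInsDesc]
  | cons f r ih => by_cases h : v ≤ f <;> simp [pvInsDesc, h, ih] <;> ring

theorem pvInsDesc_mem (v x : Int) (r : List Int) : x ∈ pvInsDesc v r ↔ x = v ∨ x ∈ r := by
  induction r with
  | nil => simp [pvInsDesc]
  | cons f r ih => by_cases h : v ≤ f <;> simp [pvInsDesc, h, ih] <;> tauto

-- master lemma: inserting v into a descending list processed with prev p ≤ v+1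
theorem pvM (r : List Int) : ∀ (v p : Int), (∀ x ∈ r, 0 ≤ x ∧ x ≤ v + 1) → 1 ≤ p → p ≤ v + 1 →
    pvBscan p (pvInsDesc v r) = (v + 1 - p) + pvBscan (p - 1) r := by
  induction r with
  | nil =>
    intro v p _ hp1 hpv
    have ha : min v (max (p - 1) 0) = p - 1 := by omega
    simp only [pvInsDesc, pvBscan, ha]
    omega
  | cons f r ih =>
    intro v p hb hp1 hpv
    have hf := hb f (by simp)
    have hv : 0 ≤ v := by omega
    by_cases hvf : v ≤ f
    · -- f stays in front of the inserted v
      simp only [pvInsDesc, if_pos hvf, pvBscan]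
      have ha : min f (max (p - 1) 0) = p - 1 := by omega
      rw [ha]
      by_cases hp2 : 2 ≤ p
      · rw [ih v (p - 1) (fun x hx => hb x (by simp [hx])) (by omega) (by omega)]
        have ha' : min f (max (p - 1 - 1) 0) = p - 2 := by omega
        rw [ha']
        have : p - 1 - 1 = p - 2 := by ring
        rw [this]; ring
      · -- p = 1
        have hp : p = 1 := by omega
        subst hp
        have e1 : (1 : Int) - 1 = 0 := by norm_num
        rw [e1]
        rw [pvBscan_le_one _ 0 (by omega)
            (fun x hx => ((pvInsDesc_mem v x r).1 hx).elim (fun h => by omega) (fun h => (hb x (by simp [h])).1)),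
          pvInsDesc_sum]
        have ha' : min f (max ((0 : Int) - 1) 0) = 0 := by omega
        rw [ha']
        rw [pvBscan_le_one _ 0 (by omega) (fun x hx => (hb x (by simp [hx])).1)]
        ring
    · -- v goes in front
      simp only [pvInsDesc, if_neg hvf, pvBscan]
      have ha : min v (max (p - 1) 0) = p - 1 := by omega
      rw [ha]; ring

theorem pvInsAsc_append_singleton (v m : Int) (hvm : v ≤ m) (ys : List Int) :
    pvInsAsc v (ys ++ [m]) = pvInsAsc v ys ++ [m] := by
  induction ys with
  | nil => simp [pvInsAsc, hvm]
  | cons y ys ih => by_cases h : v ≤ y <;> simp [pvInsAsc, h, ih]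

theorem pvInsAsc_all_lt (v : Int) (ys : List Int) (h : ∀ x ∈ ys, x < v) :
    pvInsAsc v ys = ys ++ [v] := by
  induction ys with
  | nil => simp [pvInsAsc]
  | cons y ys ih =>
    have : ¬ v ≤ y := by have := h y (by simp); omega
    simp [pvInsAsc, this, ih (fun x hx => h x (by simp [hx]))]

theorem pvInsAsc_rev (v : Int) (r : List Int) (hr : r.Pairwise (fun a b => b ≤ a)) :
    pvInsAsc v r.reverse = (pvInsDesc v r).reverse := by
  induction r with
  | nil => simp [pvInsAsc, pvInsDesc]
  | cons f r ih =>
    have hall : ∀ x ∈ r, x ≤ f := (List.pairwise_cons.1 hr).1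
    have hr' := (List.pairwise_cons.1 hr).2
    by_cases h : v ≤ f
    · simp only [pvInsDesc, if_pos h, List.reverse_cons]
      rw [pvInsAsc_append_singleton v f h, ih hr']
    · simp only [pvInsDesc, if_neg h, List.reverse_cons]
      rw [pvInsAsc_all_lt v _ (by
        intro x hx
        rcases List.mem_append.1 hx with hx | hx
        · have := hall x (List.mem_reverse.1 hx); omega
        · simp at hx; omega)]

theorem pvInsAsc_perm (v : Int) (l : List Int) : (pvInsAsc v l).Perm (v :: l) := by
  induction l with
  | nil => simp [pvInsAsc]
  | cons x xs ih =>
    by_cases h : v ≤ x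
    · simp [pvInsAsc, h]
    · simp only [pvInsAsc, if_neg h]
      exact (ih.cons x).trans (List.Perm.swap v x xs)

theorem pvInsAsc_pairwise (v : Int) (l : List Int) (hl : l.Pairwise (· ≤ ·)) :
    (pvInsAsc v l).Pairwise (· ≤ ·) := by
  induction l with
  | nil => simp [pvInsAsc]
  | cons x xs ih =>
    have hall : ∀ y ∈ xs, x ≤ y := (List.pairwise_cons.1 hl).1
    have hxs := (List.pairwise_cons.1 hl).2
    by_cases h : v ≤ x
    · simp only [pvInsAsc, if_pos h]
      refine List.pairwise_cons.2 ⟨?_, hl⟩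
      intro y hy
      rcases List.mem_cons.1 hy with rfl | hy
      · exact h
      · exact le_trans h (hall y hy)
    · simp only [pvInsAsc, if_neg h]
      refine List.pairwise_cons.2 ⟨?_, ih hxs⟩
      intro y hy
      rcases List.mem_cons.1 ((pvInsAsc_perm v xs).mem_iff.1 hy) with rfl | hy
      · omega
      · exact hall y hy

theorem pvSorted_append_singleton (l : List Int) (x : Int) (hl : l.Pairwise (· ≤ ·)) :
    PySem.List.sorted (l ++ [x]) (fun y => y) false = pvInsAsc x l := by
  apply PySem.List.sorted_id_eq_of_perm_of_pairwise
  · exact (pvInsAsc_perm x l).trans (List.perm_append_singleton x l).symm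
  · exact pvInsAsc_pairwise x l hl

-- sorted(xs, reverse=True) on Ints is the reverse of sorted(xs)
theorem pvSorted_rev_eq_reverse (xs : List Int) :
    PySem.List.sorted xs (fun y => y) true = (PySem.List.sorted xs (fun y => y) false).reverse := by
  have h1 : (PySem.List.sorted xs (fun y => y) true).Pairwise (fun a b : Int => b ≤ a) :=
    PySem.List.sorted_pairwise_rev xs (fun y => y)
  have h2 : ((PySem.List.sorted xs (fun y => y) false).reverse).Pairwise (fun a b : Int => b ≤ a) := by
    rw [List.pairwise_reverse]
    exact PySem.List.sorted_pairwise xs (fun y => y)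
  have hperm : (PySem.List.sorted xs (fun y => y) true).Perm
      ((PySem.List.sorted xs (fun y => y) false).reverse) :=
    (PySem.List.sorted_perm xs (fun y => y) true).trans (((List.reverse_perm _).trans (PySem.List.sorted_perm xs (fun y => y) false)).symm)
  exact @List.Perm.eq_of_pairwise' _ _ ⟨fun a b hab hba => le_antisymm hba hab⟩ _ _ h1 h2 hperm

-- in a sorted-ascending list written xs ++ [m], every element is at most m
theorem pvAll_le_last (xs : List Int) (m : Int) (h : (xs ++ [m]).Pairwise (· ≤ ·)) :
    ∀ x ∈ xs ++ [m], x ≤ m := by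
  intro x hx
  rcases List.mem_append.1 hx with hx | hx
  · exact (List.pairwise_append.1 h).2.2 x hx m (by simp)
  · simp at hx; omega

theorem pvMu_perm (l₁ l₂ : List Int) (h : l₁.Perm l₂) : pvMu l₁ = pvMu l₂ := by
  unfold pvMu
  rw [(h.map Int.toNat).sum_eq, h.length_eq]

theorem pvMu_cons (v : Int) (l : List Int) : pvMu (v :: l) = v.toNat + pvMu l + 1 := by
  simp [pvMu]; omega

-- the main bridge: A's loop on a sorted-ascending positive list equals B's sweep on its reverse
theorem pvA2B (n : Nat) : ∀ (l : List Int), pvMu l = n → l.Pairwise (· ≤ ·) →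
    (∀ x ∈ l, 1 ≤ x) → ∀ (P acc : Int), (∀ x ∈ l, x < P) →
    pvAloop l acc = acc + pvBscan P l.reverse := by
  induction n using Nat.strong_induction_on with
  | _ n ih =>
    intro l hmu hsort hpos P acc hlt
    by_cases hlen : 1 < l.length
    · -- loop body runs
      have hne : l ≠ [] := by intro hnil; rw [hnil] at hlen; simp at hlen
      have hsplit : l.dropLast ++ [l.getLast hne] = l := List.dropLast_concat_getLast hne
      set m := l.getLast hne with hm_def
      set rest := l.dropLast with hrest_def
      have hget : PySem.List.pyGetD l (-1) 0 = m := PySem.List.pyGetD_neg_one l 0 hne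
      have hrestne : rest ≠ [] := by
        have : rest.length = l.length - 1 := List.length_dropLast
        intro hnil; rw [hnil] at this; simp at this; omega
      have hsplit2 : rest.dropLast ++ [rest.getLast hrestne] = rest :=
        List.dropLast_concat_getLast hrestne
      set p := rest.getLast hrestne with hp_def
      set front := rest.dropLast with hfront_def
      have hget2 : PySem.List.pyGetD rest (-1) 0 = p := PySem.List.pyGetD_neg_one rest 0 hrestne
      have hsort2 : (rest ++ [m]).Pairwise (· ≤ ·) := by rw [hsplit]; exact hsort
      have hsortrest : rest.Pairwise (· ≤ ·) := (List.pairwise_append.1 hsort2).1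
      have hsort3 : (front ++ [p]).Pairwise (· ≤ ·) := by rw [hsplit2]; exact hsortrest
      have hsortfront : front.Pairwise (· ≤ ·) := (List.pairwise_append.1 hsort3).1
      have hall_le_m : ∀ x ∈ l, x ≤ m := by
        intro x hx; exact pvAll_le_last rest m hsort2 x (by rw [hsplit]; exact hx)
      have hall_le_p : ∀ x ∈ rest, x ≤ p := by
        intro x hx; exact pvAll_le_last front p hsort3 x (by rw [hsplit2]; exact hx)
      have hmem_m : m ∈ l := List.getLast_mem hne
      have hmem_p : p ∈ l := by rw [← hsplit]; exact List.mem_append_left _ (List.getLast_mem hrestne)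
      have hm1 : 1 ≤ m := hpos m hmem_m
      have hmP : m < P := hlt m hmem_m
      have hrest_pos : ∀ x ∈ rest, 1 ≤ x := fun x hx => hpos x (by rw [← hsplit]; exact List.mem_append_left _ hx)
      have hmu_l : pvMu l = pvMu rest + m.toNat + 1 := by
        conv_lhs => rw [← hsplit]
        rw [pvMu_append_singleton]
      have hrev : l.reverse = m :: rest.reverse := by
        conv_lhs => rw [← hsplit]
        simp
      have hminm : min m (max (P - 1) 0) = m := by omega
      rw [pvAloop, dif_pos hlen]
      simp only [← hrest_def, hget, hget2]
      by_cases hcase : m = p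
      · by_cases hm2 : m > 1
        · -- duplicate max, decrement and re-sort
          rw [if_pos hcase, if_pos hm2]
          rw [pvSorted_append_singleton rest (m - 1) hsortrest]
          have hrestfm : front ++ [m] = rest := by rw [← hcase] at hsplit2; exact hsplit2
          have hins : pvInsAsc (m - 1) rest = pvInsAsc (m - 1) front ++ [m] := by
            rw [← hrestfm, pvInsAsc_append_singleton (m - 1) m (by omega)]
          have hperm : (pvInsAsc (m - 1) rest).Perm ((m - 1) :: rest) := pvInsAsc_perm _ _
          have hmu2 : pvMu (pvInsAsc (m - 1) rest) < n := by
            rw [pvMu_perm _ _ hperm, pvMu_cons]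
            omega
          have hfrontrev : (pvInsAsc (m - 1) front).reverse = pvInsDesc (m - 1) front.reverse := by
            have h1 : (front.reverse).Pairwise (fun a b : Int => b ≤ a) := by
              rw [List.pairwise_reverse]
              exact hsortfront
            have h2 := pvInsAsc_rev (m - 1) front.reverse h1
            rw [List.reverse_reverse] at h2
            rw [h2, List.reverse_reverse]
          rw [ih (pvMu (pvInsAsc (m - 1) rest)) hmu2 _ rfl
              (pvInsAsc_pairwise _ _ hsortrest)
              (by
                intro x hx
                rcases List.mem_cons.1 (hperm.mem_iff.1 hx) with rfl | hx
                · omega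
                · exact hrest_pos x hx)
              P (acc + 1)
              (by
                intro x hx
                rcases List.mem_cons.1 (hperm.mem_iff.1 hx) with rfl | hx
                · omega
                · have hxp := hall_le_p x hx
                  rw [← hcase] at hxp
                  omega)]
          rw [hins, hrev]
          have hrevrest : rest.reverse = m :: front.reverse := by
            conv_lhs => rw [← hrestfm]
            simp
          simp only [List.reverse_append, List.reverse_cons, List.reverse_nil,
            List.nil_append, List.singleton_append, hfrontrev, hrevrest]
          simp only [pvBscan, hminm]
          have hmin1 : min m (max (m - 1) 0) = m - 1 := by omega
          rw [hmin1]
          rw [pvM front.reverse (m - 1) m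
              (by
                intro x hx
                have hxf : x ∈ rest := by
                  rw [← hrestfm]; exact List.mem_append_left _ (List.mem_reverse.1 hx)
                have := hrest_pos x hxf
                have := hall_le_p x hxf
                constructor <;> omega)
              (by omega) (by omega)]
          ring
        · -- duplicate max of height 1: just drop it
          rw [if_pos hcase, if_neg hm2]
          have hmeq1 : m = 1 := by omega
          have hmu_rest : pvMu rest < n := by omega
          rw [ih (pvMu rest) hmu_rest rest rfl hsortrest hrest_pos P (acc + 1)
              (fun x hx => hlt x (by rw [← hsplit]; exact List.mem_append_left _ hx))]
          have hrestfm : front ++ [m] = rest := by rw [← hcase] at hsplit2; exact hsplit2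
          have hrevrest : rest.reverse = m :: front.reverse := by
            conv_lhs => rw [← hrestfm]
            simp
          have hfront_nonneg : ∀ x ∈ front.reverse, (0 : Int) ≤ x := by
            intro x hx
            have hxf : x ∈ rest := by
              rw [← hrestfm]; exact List.mem_append_left _ (List.mem_reverse.1 hx)
            have := hrest_pos x hxf; omega
          rw [hrev, hrevrest]
          simp only [pvBscan, hminm]
          have hmin1 : min m (max (m - 1) 0) = 0 := by omega
          rw [hmin1]
          rw [pvBscan_le_one front.reverse 0 (by omega) hfront_nonneg]
          rw [pvBscan_le_one front.reverse m (by omega) hfront_nonneg]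
          omega
      · -- distinct max: drop it, nothing to pay
        rw [if_neg hcase]
        have hpm : p < m := lt_of_le_of_ne (hall_le_m p hmem_p) (fun h => hcase h.symm)
        have hmu_rest : pvMu rest < n := by omega
        rw [ih (pvMu rest) hmu_rest rest rfl hsortrest hrest_pos m acc
            (fun x hx => lt_of_le_of_lt (hall_le_p x hx) hpm)]
        rw [hrev]
        simp only [pvBscan, hminm]
        ring
    · -- 0 or 1 frequencies: loop does not run, sweep pays nothing
      rw [pvAloop, dif_neg hlen]
      match l, hlen with
      | x :: y :: t, hl => exact absurd (by simp) hl
      | [], _ => simp [pvBscan]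
      | [x], _ =>
        have hx1 : 1 ≤ x := hpos x (by simp)
        have hxP : x < P := hlt x (by simp)
        have hmin : min x (max (P - 1) 0) = x := by omega
        simp [pvBscan, hmin]

-- counter values are the multiplicities: between 1 and len(s)
theorem pvCounterValues (s : String) :
    ∀ v ∈ (PySem.Dict.counter s.toList).values, 1 ≤ v ∧ v ≤ (s.length : Int) := by
  intro v hv
  simp only [PySem.Dict.values, PySem.Dict.items_counter, List.map_map, List.mem_map] at hv
  obtain ⟨k, hk, rfl⟩ := hv
  have hkmem : k ∈ s.toList := by
    rw [PySem.Set.mem_ofList] at hk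
    exact hk
  have h1 : 0 < s.toList.count k := List.count_pos_iff.2 hkmem
  have h2 : s.toList.count k ≤ s.toList.length := List.count_le_length
  have h3 : s.toList.length = s.length := by simp
  constructor <;> simp <;> omega

-- ===== VERDICT (by name: the statement is the Claim_ definition above) =====
theorem count_letters_to_delete_spec : Claim_equal_count_letters_to_delete := by
  intro s _ _
  unfold Spec_count_letters_to_delete count_letters_to_delete count_letters_to_delete_alt
  have hvals := pvCounterValues s
  set vs := (PySem.Dict.counter s.toList).values with hvs
  have hsort : (PySem.List.sorted vs (fun x => x) false).Pairwise (· ≤ ·) :=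
    PySem.List.sorted_pairwise vs (fun x => x)
  have hmem : ∀ x ∈ PySem.List.sorted vs (fun x => x) false, x ∈ vs := by
    intro x hx
    exact (PySem.List.mem_sorted vs (fun x => x) false x).1 hx
  have hpos : ∀ x ∈ PySem.List.sorted vs (fun x => x) false, 1 ≤ x :=
    fun x hx => (hvals x (hmem x hx)).1
  have hlt : ∀ x ∈ PySem.List.sorted vs (fun x => x) false, x < (s.length : Int) + 1 :=
    fun x hx => by have := (hvals x (hmem x hx)).2; omega
  rw [pvA2B (pvMu (PySem.List.sorted vs (fun x => x) false)) _ rfl hsort hpos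
      ((s.length : Int) + 1) 0 hlt]
  rw [pvSorted_rev_eq_reverse vs]
  rw [pvFoldl_eq_bscan]
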